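-- pv_equiv track=rewrite | github.com/kovitikus/hecate-mud | world/skills/skill_handler.py | ap_required
-- ===== SOURCE A (Python) =====
-- def ap_required(desired_rank):
--     ap_per_rank = 100
--     count = 0
--     for _ in range(2, desired_rank+1):
--         count += 1
--         if count == 20:
--             ap_per_rank += 10
--             count = 0
--     return ap_per_rank
-- ===== SOURCE B (Python) =====
-- def ap_required(desired_rank):
--     # closed form: the loop runs max(0, desired_rank-1) times and bumps by 10 every 20 iterations
--     return 100 + 10 * (max(0, desired_rank - 1) // 20)
-- ===== Notes on version B (the rewrite author's own statement) =====
-- stated objective: faster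
-- what changed: Replaced the O(desired_rank) counting loop by the closed form 100 + 10*(max(0, desired_rank-1)//20).
import Mathlib
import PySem

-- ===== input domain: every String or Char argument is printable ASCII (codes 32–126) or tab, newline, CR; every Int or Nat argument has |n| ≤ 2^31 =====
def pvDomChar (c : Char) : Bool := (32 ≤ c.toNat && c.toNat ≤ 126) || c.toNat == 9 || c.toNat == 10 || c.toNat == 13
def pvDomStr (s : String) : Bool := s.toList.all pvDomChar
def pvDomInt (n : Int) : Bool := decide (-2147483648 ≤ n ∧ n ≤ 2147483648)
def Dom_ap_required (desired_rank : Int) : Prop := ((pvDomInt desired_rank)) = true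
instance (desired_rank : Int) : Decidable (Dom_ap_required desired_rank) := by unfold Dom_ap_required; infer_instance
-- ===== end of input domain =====

-- B replaces A's O(desired_rank) counting loop by the O(1) closed form 100 + 10*(max(0, desired_rank-1)//20).

-- ===== PORT A =====
def ap_required (desired_rank : Int) : Int :=
  ((PySem.List.pyRange 2 (desired_rank + 1) 1).foldl
    (fun s (_ : Int) => if s.2 + 1 = 20 then (s.1 + 10, (0 : Int)) else (s.1, s.2 + 1))
    ((100 : Int), (0 : Int))).1

-- ===== PORT B =====
def ap_required_alt (desired_rank : Int) : Int :=
  100 + 10 * PySem.Int.floordiv (max 0 (desired_rank - 1)) 20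

-- ===== PRECONDITION & SPEC =====
def Spec_ap_required (desired_rank : Int) (out : Int) : Prop := out = ap_required_alt desired_rank
instance (desired_rank : Int) (out : Int) : Decidable (Spec_ap_required desired_rank out) := by unfold Spec_ap_required; infer_instance

-- ===== CLAIM (what is proved, stated in full; the proofs are below) =====
def Claim_equal_ap_required : Prop := ∀ (desired_rank : Int), Dom_ap_required desired_rank → Spec_ap_required desired_rank (ap_required desired_rank)

-- ===== LEMMAS AND PROOFS =====

-- Loop invariant: after k total iterations the state is (100 + 10*(k/20), k%20).
theorem ap_loop_inv {α : Type} (l : List α) (k : Nat) :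
    l.foldl (fun s (_ : α) => if s.2 + 1 = 20 then (s.1 + 10, (0 : Int)) else (s.1, s.2 + 1))
      (100 + 10 * ((k / 20 : Nat) : Int), ((k % 20 : Nat) : Int))
    = (100 + 10 * (((k + l.length) / 20 : Nat) : Int), (((k + l.length) % 20 : Nat) : Int)) := by
  induction l generalizing k with
  | nil => simp
  | cons x xs ih =>
    simp only [List.foldl_cons, List.length_cons]
    by_cases h : ((k % 20 : Nat) : Int) + 1 = 20
    · rw [if_pos h]
      have e1 : ((100 + 10 * ((k / 20 : Nat) : Int) + 10, (0 : Int)) : Int × Int)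
          = (100 + 10 * (((k + 1) / 20 : Nat) : Int), (((k + 1) % 20 : Nat) : Int)) := by
        rw [Prod.mk.injEq]; constructor <;> omega
      rw [e1, ih (k + 1)]
      rw [Prod.mk.injEq]; constructor <;> · congr 2 <;> omega
    · rw [if_neg h]
      have e1 : ((100 + 10 * ((k / 20 : Nat) : Int), ((k % 20 : Nat) : Int) + 1) : Int × Int)
          = (100 + 10 * (((k + 1) / 20 : Nat) : Int), (((k + 1) % 20 : Nat) : Int)) := by
        rw [Prod.mk.injEq]; constructor <;> omega
      rw [e1, ih (k + 1)]
      rw [Prod.mk.injEq]; constructor <;> · congr 2 <;> omega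

-- ===== VERDICT (by name: the statement is the Claim_ definition above) =====
theorem ap_required_spec : Claim_equal_ap_required := by
  intro n _
  show ap_required n = ap_required_alt n
  unfold ap_required ap_required_alt
  rw [PySem.List.pyRange_one, List.foldl_map]
  have h0 : ((100 : Int), (0 : Int))
      = (100 + 10 * ((0 / 20 : Nat) : Int), ((0 % 20 : Nat) : Int)) := by norm_num
  rw [h0, ap_loop_inv (List.range (n + 1 - 2).toNat) 0]
  simp only [List.length_range, Nat.zero_add]
  have hmax : max 0 (n - 1) = (((n + 1 - 2).toNat : Nat) : Int) := by omega
  rw [hmax, PySem.Int.floordiv_eq_ediv_of_pos (by norm_num)]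
  omega
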